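-- pv_equiv track=rewrite | github.com/yuichiinumaru/overpowers | skills/safety-sec-pci-compliance/scripts/pci_utils.py | sanitize_payment_data
-- ===== SOURCE A (Python) =====
-- def mask_pan(pan):
--     """Mask Primary Account Number (PAN)."""
--     if not pan:
--         return pan
--     pan_str = str(pan)
--     if len(pan_str) < 10:
--         return "****"
--     return f"{pan_str[:6]}{'*' * (len(pan_str) - 10)}{pan_str[-4:]}"
--
-- def sanitize_payment_data(data):
--     """Remove sensitive data from dictionary (suitable for logging)."""
--     prohibited_fields = ['cvv', 'cvv2', 'cvc', 'pin', 'password', 'secret']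
--     sanitized = data.copy()
--
--     # Mask PAN if present
--     for key in sanitized:
--         if 'card_number' in key.lower() or 'pan' in key.lower():
--             sanitized[key] = mask_pan(sanitized[key])
--
--     # Remove prohibited data
--     for field in prohibited_fields:
--         for key in list(sanitized.keys()):
--             if field in key.lower():
--                 sanitized.pop(key, None)
--
--     return sanitized
-- ===== SOURCE B (Python) =====
-- def mask_pan(pan):
--     """Mask Primary Account Number (PAN)."""
--     if not pan:
--         return pan
--     pan_str = str(pan)
--     if len(pan_str) < 10:
--         return "****"
--     return f"{pan_str[:6]}{'*' * (len(pan_str) - 10)}{pan_str[-4:]}"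
--
-- def sanitize_payment_data(data):
--     """Single pass: drop prohibited keys, mask PAN-like keys, keep the rest."""
--     prohibited_fields = ('cvv', 'cvv2', 'cvc', 'pin', 'password', 'secret')
--     out = {}
--     for key, value in data.items():
--         kl = key.lower()
--         if any(field in kl for field in prohibited_fields):
--             continue
--         if 'card_number' in kl or 'pan' in kl:
--             out[key] = mask_pan(value)
--         else:
--             out[key] = value
--     return out
-- ===== Notes on version B (the rewrite author's own statement) =====
-- stated objective: simpler
-- what changed: Replaces copy-then-two-passes (mutating mask pass plus a nested remove pass per prohibited field) with one pass over the items that skips prohibited keys, masks PAN-like keys and copies the rest.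
import Mathlib
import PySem

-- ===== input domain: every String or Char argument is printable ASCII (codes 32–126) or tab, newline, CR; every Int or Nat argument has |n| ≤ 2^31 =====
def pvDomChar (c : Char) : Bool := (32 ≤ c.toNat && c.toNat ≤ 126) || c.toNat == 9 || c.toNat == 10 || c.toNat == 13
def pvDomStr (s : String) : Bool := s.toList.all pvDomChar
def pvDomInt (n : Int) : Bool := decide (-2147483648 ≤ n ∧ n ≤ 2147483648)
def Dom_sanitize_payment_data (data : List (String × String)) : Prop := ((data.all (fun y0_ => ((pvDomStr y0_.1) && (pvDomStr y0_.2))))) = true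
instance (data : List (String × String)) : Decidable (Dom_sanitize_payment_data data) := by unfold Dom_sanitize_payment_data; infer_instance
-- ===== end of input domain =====

-- B is a single pass that drops prohibited keys, masks PAN keys and copies the rest,
-- instead of A's copy + mask pass + one removal re-scan per prohibited field (objective: simpler).
-- Equivalence is about the returned dict; neither program mutates its argument.

-- ===== PORT A =====
-- shared helper mask_pan, used verbatim by both Pythons
def mask_pan (pan : String) : String :=
  if pan = "" then pan
  else
    let l := pan.toList
    if l.length < 10 then "****"
    else String.ofList (PySem.List.slice l none (some 6)
          ++ List.replicate (l.length - 10) '*'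
          ++ PySem.List.slice l (some (-4)) none)

def pv_prohibited : List String := ["cvv", "cvv2", "cvc", "pin", "password", "secret"]

-- 'card_number' in key.lower() or 'pan' in key.lower()
def pv_panKey (k : String) : Bool :=
  PySem.Str.isIn "card_number" (PySem.Str.lower k) || PySem.Str.isIn "pan" (PySem.Str.lower k)

-- A: copy, then mask PAN values in place, then for each prohibited field pop every matching key
def sanitize_payment_data (data : List (String × String)) : List (String × String) :=
  let sanitized := data.map (fun p => if pv_panKey p.1 then (p.1, mask_pan p.2) else p)
  pv_prohibited.foldl
    (fun acc field => acc.filter (fun p => !(PySem.Str.isIn field (PySem.Str.lower p.1))))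
    sanitized

-- ===== PORT B =====
-- any(field in kl for field in prohibited_fields)
def pv_prohibMatch (k : String) : Bool :=
  pv_prohibited.any (fun field => PySem.Str.isIn field (PySem.Str.lower k))

-- the body of B's single loop: skip, mask, or copy one item
def pv_stepB (out : List (String × String)) (p : String × String) : List (String × String) :=
  if pv_prohibMatch p.1 then out
  else if pv_panKey p.1 then out ++ [(p.1, mask_pan p.2)]
  else out ++ [p]

def sanitize_payment_data_alt (data : List (String × String)) : List (String × String) :=
  data.foldl pv_stepB []

-- ===== PRECONDITION & SPEC =====
def Spec_sanitize_payment_data (data : List (String × String)) (out : List (String × String)) : Prop := out = sanitize_payment_data_alt data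
instance (data : List (String × String)) (out : List (String × String)) : Decidable (Spec_sanitize_payment_data data out) := by unfold Spec_sanitize_payment_data; infer_instance

-- ===== CLAIM (what is proved, stated in full; the proofs are below) =====
def Claim_equal_sanitize_payment_data : Prop := ∀ (data : List (String × String)), Dom_sanitize_payment_data data → Spec_sanitize_payment_data data (sanitize_payment_data data)

-- ===== LEMMAS AND PROOFS =====

-- A's removal loop is one filter with the conjunction of all the per-field tests
theorem foldl_filter_eq_filter_all {α : Type} (fields : List String)
    (q : String → α → Bool) (l : List α) :
    fields.foldl (fun acc field => acc.filter (fun p => !(q field p))) l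
      = l.filter (fun p => fields.all (fun field => !(q field p))) := by
  induction fields generalizing l with
  | nil => simp
  | cons f fs ih =>
      simp only [List.foldl_cons, ih, List.filter_filter, List.all_cons]
      congr 1
      funext p
      exact Bool.and_comm _ _

theorem stepB_append (acc : List (String × String)) (p : String × String) :
    pv_stepB acc p = acc ++ pv_stepB [] p := by
  unfold pv_stepB; split_ifs <;> simp

-- B's loop with a non-empty accumulator just prepends the accumulator
theorem foldl_stepB_acc (data : List (String × String)) (acc : List (String × String)) :
    data.foldl pv_stepB acc = acc ++ data.foldl pv_stepB [] := by
  induction data generalizing acc with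
  | nil => simp
  | cons p ps ih =>
      simp only [List.foldl_cons]
      rw [ih, ih (acc := pv_stepB [] p), stepB_append, List.append_assoc]

theorem all_not_isIn_eq (k : String) :
    (pv_prohibited.all (fun field => !(PySem.Str.isIn field (PySem.Str.lower k))))
      = !pv_prohibMatch k := by
  simp [pv_prohibMatch, List.all_eq_not_any_not]

theorem sanitize_eq (data : List (String × String)) :
    sanitize_payment_data data = sanitize_payment_data_alt data := by
  unfold sanitize_payment_data sanitize_payment_data_alt
  rw [foldl_filter_eq_filter_all]
  induction data with
  | nil => simp
  | cons p ps ih =>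
      simp only [List.map_cons, List.filter_cons, List.foldl_cons]
      rw [foldl_stepB_acc, ← ih]
      have hA := all_not_isIn_eq p.1
      by_cases hpan : pv_panKey p.1 = true <;>
        by_cases hp : pv_prohibMatch p.1 = true <;>
          simp [hpan, hp, pv_stepB, hA] <;> (try exact hA) <;> (try simp [hp] at hA) <;> (try exact hA)

-- ===== VERDICT (by name: the statement is the Claim_ definition above) =====
theorem sanitize_payment_data_spec : Claim_equal_sanitize_payment_data := by
  intro data _
  exact sanitize_eq data
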